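-- pv_equiv track=rewrite | github.com/Migorithm/Algorithm | Algorithm_73_recommended_job.py | solution
-- ===== SOURCE A (Python) =====
-- def solution(table, languages, preference):
--     #hash map만들기.
--     lst  = [i.split() for i in table]
--     point_table = {i[0]:i[-1:0:-1] for i in lst}
--
--     area = {i:0 for i in point_table.keys()}
--     for i,j in zip(languages,preference): #language당 preference
--         for k in point_table:
--             if i in point_table[k]:
--                 language_point = point_table[k].index(i) +1
--                 area[k] += language_point*j
--
--     num  =0 # to keep tract of the maximum number
--
--     close_to_answer = {}
--     for value,key in area.items():
--         if key not in close_to_answer: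
--             close_to_answer[key] = [value]
--             if key > num:
--                 num = key
--         else:
--             close_to_answer[key].append(value)
--
--     return sorted(close_to_answer[num])[0]
-- ===== SOURCE B (Python) =====
-- def solution(table, languages, preference):
--     weight = {}
--     for lang, pref in zip(languages, preference):
--         weight[lang] = weight.get(lang, 0) + pref
--     scores = {}
--     for row in table:
--         words = row.split()
--         cat, langs = words[0], words[1:]
--         n = len(langs)
--         rank = {}
--         for pos, w in enumerate(langs):
--             rank[w] = n - pos
--         scores[cat] = sum(r * weight.get(w, 0) for w, r in rank.items())
--     best = max(scores.values())
--     return min(c for c, s in scores.items() if s == best)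
-- ===== Notes on version B (the rewrite author's own statement) =====
-- stated objective: faster
-- what changed: Instead of A's nested loop that scans every category's word list for every (language, preference) pair, B builds a language->summed-preference dict in one pass over the rankings and then scores each table row in a single pass over its words via a per-row rank dict.
import Mathlib
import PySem

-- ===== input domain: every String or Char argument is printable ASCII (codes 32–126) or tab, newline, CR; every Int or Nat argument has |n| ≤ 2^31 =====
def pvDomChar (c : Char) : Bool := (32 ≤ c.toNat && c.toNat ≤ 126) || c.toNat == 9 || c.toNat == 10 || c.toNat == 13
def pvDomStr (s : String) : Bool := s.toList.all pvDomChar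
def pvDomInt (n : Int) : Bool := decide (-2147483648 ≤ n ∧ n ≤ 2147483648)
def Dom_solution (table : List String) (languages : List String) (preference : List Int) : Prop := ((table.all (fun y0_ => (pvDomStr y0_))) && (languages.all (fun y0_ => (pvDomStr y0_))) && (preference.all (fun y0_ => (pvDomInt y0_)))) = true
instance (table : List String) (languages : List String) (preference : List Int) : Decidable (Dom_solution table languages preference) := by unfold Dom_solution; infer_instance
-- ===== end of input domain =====

-- B replaces A's nested scans (every category's word list rescanned for every (language, preference)
-- pair) by a language→summed-preference dict built in one pass plus one pass per table row.

-- ===== PORT A =====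
def solution (table : List String) (languages : List String) (preference : List Int) : String :=
  let lst := table.map (fun i => PySem.Str.split₀ i)
  let point_table : PySem.Dict String (List String) :=
    lst.foldl (fun d i => d.insert (PySem.List.pyGetD i 0 "")
      ((PySem.List.slice? i (some (-1)) (some 0) (-1)).getD [])) PySem.Dict.empty
  let area0 : PySem.Dict String Int :=
    point_table.keys.foldl (fun d i => d.insert i 0) PySem.Dict.empty
  let area :=
    (languages.zip preference).foldl (fun area ij =>
      point_table.keys.foldl (fun area k =>
        if ij.1 ∈ point_table.getD k [] then
          area.modify k 0 (fun x => x + (((PySem.List.index? (point_table.getD k []) ij.1).getD 0 : Int) + 1) * ij.2)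
        else area) area) area0
  let nc : Int × PySem.Dict Int (List String) :=
    area.items.foldl (fun nc vk =>
      if nc.2.contains vk.2 = false then
        (if vk.2 > nc.1 then vk.2 else nc.1, nc.2.insert vk.2 [vk.1])
      else (nc.1, nc.2.modify vk.2 [] (fun l => l ++ [vk.1]))) (0, PySem.Dict.empty)
  PySem.List.pyGetD (PySem.List.sorted (nc.2.getD nc.1 []) (fun x => x) false) 0 ""

-- ===== PORT B =====
def solution_alt (table : List String) (languages : List String) (preference : List Int) : String :=
  let weight : PySem.Dict String Int :=
    (languages.zip preference).foldl (fun d lp => d.insert lp.1 (d.getD lp.1 0 + lp.2)) PySem.Dict.empty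
  let scores : PySem.Dict String Int :=
    table.foldl (fun sc row =>
      let words := PySem.Str.split₀ row
      let cat := PySem.List.pyGetD words 0 ""
      let langs := PySem.List.slice words (some 1) none
      let n : Int := (langs.length : Int)
      let rank : PySem.Dict String Int :=
        (PySem.List.enumerate langs 0).foldl (fun r pw => r.insert pw.2 (n - pw.1)) PySem.Dict.empty
      sc.insert cat ((rank.items.map (fun wr => wr.2 * weight.getD wr.1 0)).sum)) PySem.Dict.empty
  let best : Int := (PySem.List.max? scores.values (fun x => x)).getD 0
  (PySem.List.min? ((scores.items.filter (fun cs => cs.2 == best)).map (fun cs => cs.1)) (fun x => x)).getD ""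

-- ===== PRECONDITION & SPEC =====
-- Spec-level score bookkeeping (used by Pre_ and the proofs; independent of both ports):
-- pvWeight = total preference attached to one language, pvRank = 1-based position of a word
-- counted from the end of its row, pvScoreDict = category → total score (last row wins).
def pvWeight (languages : List String) (preference : List Int) (w : String) : Int :=
  (((languages.zip preference).filter (fun p => p.1 == w)).map (fun p => p.2)).sum

def pvRank (langs : List String) (w : String) : Int := (langs.reverse.idxOf w : Int) + 1

def pvRowScore (languages : List String) (preference : List Int) (ws : List String) : Int :=
  ((PySem.Set.ofList (ws.drop 1)).map
    (fun w => pvRank (ws.drop 1) w * pvWeight languages preference w)).sum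

def pvScoreDict (table : List String) (languages : List String) (preference : List Int) : PySem.Dict String Int :=
  table.foldl (fun d row =>
    d.insert (PySem.List.pyGetD (PySem.Str.split₀ row) 0 "")
      (pvRowScore languages preference (PySem.Str.split₀ row))) PySem.Dict.empty

-- Pre_ excludes exactly the inputs on which A raises: an empty table (KeyError), a row whose
-- split is empty (IndexError on words[0]), and the case where every category's total score is
-- negative (A's running maximum starts at 0, so close_to_answer[0] raises KeyError).
def Pre_solution (table : List String) (languages : List String) (preference : List Int) : Prop :=
  table ≠ [] ∧ (∀ s ∈ table, PySem.Str.split₀ s ≠ []) ∧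
    ∃ v ∈ (pvScoreDict table languages preference).values, 0 ≤ v
instance (table : List String) (languages : List String) (preference : List Int) : Decidable (Pre_solution table languages preference) := by unfold Pre_solution; infer_instance

def pvWitness_solution : List String × List String × List Int := (["a b"], ["b"], [1])

def Spec_solution (table : List String) (languages : List String) (preference : List Int) (out : String) : Prop := out = solution_alt table languages preference
instance (table : List String) (languages : List String) (preference : List Int) (out : String) : Decidable (Spec_solution table languages preference out) := by unfold Spec_solution; infer_instance

-- ===== CLAIM (what is proved, stated in full; the proofs are below) =====
def Claim_equal_solution : Prop := ∀ (table : List String) (languages : List String) (preference : List Int), Dom_solution table languages preference → Pre_solution table languages preference → Spec_solution table languages preference (solution table languages preference)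

-- ===== LEMMAS AND PROOFS =====

-- proof-only helpers
def pvCats (table : List String) : List String :=
  PySem.Set.ofList (table.map (fun row => PySem.List.pyGetD (PySem.Str.split₀ row) 0 ""))

def pvAnswer (table : List String) (languages : List String) (preference : List Int) : String :=
  let items := (pvScoreDict table languages preference).items
  let best : Int := (PySem.List.max? (pvScoreDict table languages preference).values (fun x => x)).getD 0
  (PySem.List.min? ((items.filter (fun cs => cs.2 == best)).map (fun cs => cs.1)) (fun x => x)).getD ""

-- xs[-1:0:-1] is the reversed tail of xs.
theorem pv_slice_rev_tail {α : Type} (xs : List α) :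
    PySem.List.slice? xs (some (-1)) (some 0) (-1) = some (xs.drop 1).reverse := by
  rcases xs with _ | ⟨a, t⟩
  · rfl
  · simp only [PySem.List.slice?, PySem.List.sliceIndices]
    norm_num
    have hif : (if 0 < t.length then t.length else 0) = t.length := by split <;> omega
    rw [hif]
    apply List.ext_getElem
    · simp
    · intro k h1 h2
      simp only [List.getElem_map, List.getElem_range, List.getElem_reverse]
      have hk : k < t.length := by simpa using h2
      have hidx : ((t.length : Int) + -(k : Int)).toNat = t.length - k := by omega
      simp only [hidx]
      have h3 : t.length - k = (t.length - 1 - k) + 1 := by omega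
      simp only [h3, List.getElem_cons_succ]

-- a keyed insert loop looked up afterwards: the last matching element wins
theorem pv_getD_foldl_insert_fn {β κ ν : Type} [BEq κ] [LawfulBEq κ] [DecidableEq κ]
    (l : List β) (key : β → κ) (val : β → ν) (d : PySem.Dict κ ν) (k : κ) (d0 : ν) :
    (l.foldl (fun d x => d.insert (key x) (val x)) d).getD k d0 =
      (match l.reverse.find? (fun x => key x == k) with
       | some x => val x
       | none => d.getD k d0) := by
  induction l using List.reverseRecOn with
  | nil => simp
  | append_singleton l a ih =>
    rw [List.foldl_append, List.reverse_append]
    simp only [List.foldl_cons, List.foldl_nil, List.reverse_singleton, List.singleton_append,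
      List.find?_cons]
    by_cases h : key a = k
    · simp [h]
    · have hb : (key a == k) = false := by simp [h]
      rw [hb]
      rw [PySem.Dict.getD_insert]
      rw [if_neg (fun hk => h hk.symm)]
      exact ih

-- sum over a nodup list of a single-point function
theorem pv_sum_if_mem (S : List String) (hS : S.Nodup) (a : String) (g : String → Int) :
    (S.map (fun w => if w = a then g w else 0)).sum = if a ∈ S then g a else 0 := by
  induction S with
  | nil => simp
  | cons x t ih =>
    simp only [List.map_cons, List.sum_cons, List.mem_cons]
    have hnd := hS
    rw [List.nodup_cons] at hnd
    by_cases h : x = a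
    · subst h
      rw [if_pos rfl, ih hnd.2, if_neg hnd.1, if_pos (Or.inl rfl)]
      ring
    · rw [if_neg h, ih hnd.2]
      by_cases h2 : a ∈ t
      · simp [h2, Ne.symm h]
      · simp [h2, Ne.symm h]

-- exchanging the two summation orders: per (language, pref) pair vs per distinct word
theorem pv_sum_zip_split (L : List (String × Int)) (f : String → Int) (S : List String) (hS : S.Nodup) :
    ((L.map (fun p => if p.1 ∈ S then f p.1 * p.2 else 0)).sum) =
      (S.map (fun w => f w * ((L.filter (fun p => p.1 == w)).map (fun p => p.2)).sum)).sum := by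
  induction L with
  | nil =>
    rw [List.map_nil, List.sum_nil]
    symm
    apply List.sum_eq_zero
    intro x hx
    obtain ⟨w, _, hw⟩ := List.mem_map.mp hx
    simp at hw
    omega
  | cons p L ih =>
    simp only [List.map_cons, List.sum_cons]
    have hfun : ∀ w ∈ S, f w * (((p :: L).filter (fun q => q.1 == w)).map (fun q => q.2)).sum =
        (if w = p.1 then f w * p.2 else 0) + f w * ((L.filter (fun q => q.1 == w)).map (fun q => q.2)).sum := by
      intro w _
      by_cases h : p.1 = w
      · simp [h, mul_add]
      · have : (p.1 == w) = false := by simp [h]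
        simp [this, Ne.symm h]
    rw [List.map_congr_left hfun, List.sum_map_add, pv_sum_if_mem S hS p.1 (fun w => f w * p.2), ← ih]

theorem pv_index?_getD_of_mem (R : List String) (w : String) (h : w ∈ R) :
    ((PySem.List.index? R w).getD 0 : Int) = (R.idxOf w : Int) := by
  induction R with
  | nil => simp at h
  | cons x t ih =>
    by_cases hx : x = w
    · subst hx
      rw [PySem.List.index?_cons_self]
      simp [List.idxOf_cons_self]
    · rw [PySem.List.index?_cons_of_ne _ hx]
      have hw : w ∈ t := by
        rcases List.mem_cons.mp h with h1 | h1
        · exact absurd h1.symm hx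
        · exact h1
      rw [List.idxOf_cons_ne _ (by simpa using hx)]
      have := ih hw
      rcases ho : PySem.List.index? t w with _ | k
      · rw [PySem.List.index?_eq_none_iff] at ho; exact absurd hw ho
      · rw [ho] at this
        simp only [Option.map_some, Option.getD_some] at this ⊢
        omega

theorem pv_find?_enumerate_rev {α : Type} [BEq α] [LawfulBEq α] (xs : List α) (s : Int) (w : α) (h : w ∈ xs) :
    (PySem.List.enumerate xs s).reverse.find? (fun pw => pw.2 == w) =
      some ((s + (xs.length : Int) - 1 - (xs.reverse.idxOf w : Int), w)) := by
  induction xs using List.reverseRecOn with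
  | nil => simp at h
  | append_singleton ys a ih =>
    rw [PySem.List.enumerate_append]
    simp only [PySem.List.enumerate, List.reverse_append, List.reverse_singleton]
    rw [List.singleton_append, List.find?_cons]
    by_cases ha : a = w
    · subst ha
      simp only [BEq.rfl]
      congr 1
      rw [List.singleton_append, List.idxOf_cons_self]
      simp
      omega
    · have hb : (a == w) = false := by simp [ha]
      simp only [hb]
      have hw : w ∈ ys := by
        rcases List.mem_append.mp h with h1 | h1
        · exact h1
        · simp at h1; exact absurd h1.symm ha
      rw [ih hw]
      congr 1
      rw [List.singleton_append, List.idxOf_cons_ne _ (by simpa using ha)]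
      have := List.idxOf_lt_length_of_mem (List.mem_reverse.mpr hw)
      simp only [List.length_append, List.length_reverse, List.length_singleton] at *
      congr 1
      push_cast
      omega

-- B's per-row rank dict: value of a present word is its 1-based rank from the end
theorem pv_rank_getD (langs : List String) (w : String) (h : w ∈ langs) :
    ((PySem.List.enumerate langs 0).foldl
        (fun r pw => r.insert pw.2 ((langs.length : Int) - pw.1)) PySem.Dict.empty).getD w 0 =
      pvRank langs w := by
  rw [pv_getD_foldl_insert_fn (PySem.List.enumerate langs 0) (fun pw => pw.2)
    (fun pw => (langs.length : Int) - pw.1) PySem.Dict.empty w 0]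
  rw [pv_find?_enumerate_rev langs 0 w h]
  simp only []
  have := List.idxOf_lt_length_of_mem (List.mem_reverse.mpr h)
  rw [List.length_reverse] at this
  unfold pvRank
  ring_nf

theorem pv_rank_keys (langs : List String) :
    ((PySem.List.enumerate langs 0).foldl
        (fun r pw => r.insert pw.2 ((langs.length : Int) - pw.1)) PySem.Dict.empty).keys =
      PySem.Set.ofList langs := by
  rw [PySem.Dict.keys_foldl_insert_key (PySem.List.enumerate langs 0) (fun pw => pw.2)
    (fun _ pw => (langs.length : Int) - pw.1) PySem.Dict.empty]
  rw [PySem.Dict.keys_empty, PySem.List.map_snd_enumerate, PySem.Set.update_nil_left]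

-- B's weight dict accumulates exactly the per-language preference totals
theorem pv_weight_getD (L : List (String × Int)) (d : PySem.Dict String Int) (w : String) :
    (L.foldl (fun d lp => d.insert lp.1 (d.getD lp.1 0 + lp.2)) d).getD w 0 =
      d.getD w 0 + ((L.filter (fun p => p.1 == w)).map (fun p => p.2)).sum := by
  induction L generalizing d with
  | nil => simp
  | cons p L ih =>
    rw [List.foldl_cons, ih]
    rw [PySem.Dict.getD_insert]
    by_cases h : w = p.1
    · subst h
      simp
      ring
    · rw [if_neg h]
      have hb : (p.1 == w) = false := by simp [Ne.symm h]
      simp [hb]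

-- A's inner loop over the (nodup) key list touches each key at most once
theorem pv_inner_loop (keys : List String) (hnd : keys.Nodup) (P : String → Prop) [DecidablePred P]
    (f : String → Int → Int) (area : PySem.Dict String Int) (c : String) :
    (keys.foldl (fun a k => if P k then a.modify k 0 (f k) else a) area).getD c 0 =
      if c ∈ keys ∧ P c then f c (area.getD c 0) else area.getD c 0 := by
  induction keys generalizing area with
  | nil => simp
  | cons k t ih =>
    rw [List.nodup_cons] at hnd
    rw [List.foldl_cons, ih hnd.2]
    by_cases hP : P k
    · rw [if_pos hP]
      by_cases hc : c = k
      · subst hc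
        rw [if_neg (fun hh => hnd.1 hh.1), PySem.Dict.getD_modify_self,
          if_pos ⟨List.mem_cons_self, hP⟩]
      · rw [PySem.Dict.getD_modify_of_ne _ _ _ hc]
        by_cases hm : c ∈ t ∧ P c
        · rw [if_pos hm, if_pos ⟨List.mem_cons_of_mem _ hm.1, hm.2⟩]
        · rw [if_neg hm, if_neg (fun hh => hm ⟨(List.mem_cons.mp hh.1).resolve_left hc, hh.2⟩)]
    · rw [if_neg hP]
      by_cases hm : c ∈ t ∧ P c
      · rw [if_pos hm, if_pos ⟨List.mem_cons_of_mem _ hm.1, hm.2⟩]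
      · rw [if_neg hm]
        rw [if_neg]
        intro hh
        rcases List.mem_cons.mp hh.1 with h1 | h1
        · exact hP (h1 ▸ hh.2)
        · exact hm ⟨h1, hh.2⟩

theorem pv_inner_loop_keys (keys : List String) (P : String → Prop) [DecidablePred P]
    (f : String → Int → Int) (area : PySem.Dict String Int)
    (h : ∀ k ∈ keys, area.contains k = true) :
    (keys.foldl (fun a k => if P k then a.modify k 0 (f k) else a) area).keys = area.keys := by
  induction keys generalizing area with
  | nil => rfl
  | cons k t ih =>
    rw [List.foldl_cons]
    by_cases hP : P k
    · rw [if_pos hP]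
      have hc : area.contains k = true := h k List.mem_cons_self
      have hkeys : (area.modify k 0 (f k)).keys = area.keys := by
        rw [PySem.Dict.keys_modify, PySem.Dict.keys_insert_of_contains _ _ hc]
      rw [ih _ (fun k' hk' => by
        rw [PySem.Dict.contains_modify]
        rw [h k' (List.mem_cons_of_mem _ hk')]
        simp), hkeys]
    · rw [if_neg hP]
      exact ih _ (fun k' hk' => h k' (List.mem_cons_of_mem _ hk'))

-- A's outer loop accumulates one term per (language, preference) pair
theorem pv_outer_loop (pt : PySem.Dict String (List String)) (L : List (String × Int))
    (area : PySem.Dict String Int) (hnd : pt.keys.Nodup) (hkeys : area.keys = pt.keys)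
    (c : String) (hc : c ∈ pt.keys) :
    (L.foldl (fun area ij =>
        pt.keys.foldl (fun area k =>
          if ij.1 ∈ pt.getD k [] then
            area.modify k 0 (fun x => x + (((PySem.List.index? (pt.getD k []) ij.1).getD 0 : Int) + 1) * ij.2)
          else area) area) area).getD c 0 =
      area.getD c 0 +
        (L.map (fun p => if p.1 ∈ pt.getD c [] then
            (((PySem.List.index? (pt.getD c []) p.1).getD 0 : Int) + 1) * p.2 else 0)).sum := by
  induction L generalizing area with
  | nil => simp
  | cons p L ih =>
    rw [List.foldl_cons]
    have harea' : ∀ k ∈ pt.keys, area.contains k = true := by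
      intro k hk
      rw [PySem.Dict.contains_iff_mem_keys, hkeys]
      exact hk
    have hk' := pv_inner_loop_keys pt.keys (fun k => p.1 ∈ pt.getD k [])
      (fun k x => x + (((PySem.List.index? (pt.getD k []) p.1).getD 0 : Int) + 1) * p.2) area harea'
    rw [ih _ (by rw [hk', hkeys])]
    rw [pv_inner_loop pt.keys hnd (fun k => p.1 ∈ pt.getD k [])
      (fun k x => x + (((PySem.List.index? (pt.getD k []) p.1).getD 0 : Int) + 1) * p.2) area c]
    rw [List.map_cons, List.sum_cons]
    by_cases hP : p.1 ∈ pt.getD c []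
    · rw [if_pos ⟨hc, hP⟩, if_pos hP]; ring
    · rw [if_neg (fun hh => hP hh.2), if_neg hP]; ring

theorem pv_outer_loop_keys (pt : PySem.Dict String (List String)) (L : List (String × Int))
    (area : PySem.Dict String Int) (hkeys : area.keys = pt.keys) :
    (L.foldl (fun area ij =>
        pt.keys.foldl (fun area k =>
          if ij.1 ∈ pt.getD k [] then
            area.modify k 0 (fun x => x + (((PySem.List.index? (pt.getD k []) ij.1).getD 0 : Int) + 1) * ij.2)
          else area) area) area).keys = pt.keys := by
  induction L generalizing area with
  | nil => exact hkeys
  | cons p L ih =>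
    rw [List.foldl_cons]
    apply ih
    rw [pv_inner_loop_keys pt.keys (fun k => p.1 ∈ pt.getD k [])
      (fun k x => x + (((PySem.List.index? (pt.getD k []) p.1).getD 0 : Int) + 1) * p.2) area
      (fun k hk => by rw [PySem.Dict.contains_iff_mem_keys, hkeys]; exact hk)]
    exact hkeys

-- the grouping fold of A: second component ignores the running maximum
theorem pv_sel_snd (L : List (String × Int)) (num : Int) (d : PySem.Dict Int (List String)) :
    (L.foldl (fun nc vk =>
        if nc.2.contains vk.2 = false then
          ((if vk.2 > nc.1 then vk.2 else nc.1 : Int), nc.2.insert vk.2 [vk.1])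
        else (nc.1, nc.2.modify vk.2 [] (fun l => l ++ [vk.1]))) (num, d)).2 =
      L.foldl (fun d vk =>
        if d.contains vk.2 = false then d.insert vk.2 [vk.1]
        else d.modify vk.2 [] (fun l => l ++ [vk.1])) d := by
  induction L generalizing num d with
  | nil => rfl
  | cons p L ih =>
    rw [List.foldl_cons, List.foldl_cons]
    by_cases hc : d.contains p.2 = false
    · rw [if_pos hc, if_pos hc]; exact ih _ _
    · rw [if_neg hc, if_neg hc]; exact ih _ _

theorem pv_close_getD (L : List (String × Int)) (d : PySem.Dict Int (List String)) (v : Int) :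
    (L.foldl (fun d vk =>
        if d.contains vk.2 = false then d.insert vk.2 [vk.1]
        else d.modify vk.2 [] (fun l => l ++ [vk.1])) d).getD v [] =
      d.getD v [] ++ (L.filter (fun p => p.2 == v)).map (fun p => p.1) := by
  induction L generalizing d with
  | nil => simp
  | cons p L ih =>
    rw [List.foldl_cons, ih]
    have hstep : (if d.contains p.2 = false then d.insert p.2 [p.1]
        else d.modify p.2 [] (fun l => l ++ [p.1])).getD v [] =
        d.getD v [] ++ (if p.2 == v then [p.1] else []) := by
      by_cases hc : d.contains p.2 = false
      · rw [if_pos hc, PySem.Dict.getD_insert]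
        by_cases hv : v = p.2
        · subst hv
          have hnone : d.get? p.2 = none := (PySem.Dict.get?_eq_none_iff_contains d p.2).mpr hc
          simp [PySem.Dict.getD, hnone]
        · have hb : (p.2 == v) = false := by simp [Ne.symm hv]
          simp [hv, hb]
      · rw [if_neg hc, PySem.Dict.getD_modify]
        by_cases hv : v = p.2
        · subst hv; simp
        · have hb : (p.2 == v) = false := by simp [Ne.symm hv]
          simp [hv, hb]
    rw [hstep, List.filter_cons]
    by_cases hb : (p.2 == v) = true
    · simp [hb]
    · simp at hb
      have : (p.2 == v) = false := by simp [hb]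
      simp [this]

-- A's running maximum over the grouping fold is a plain running maximum of the values
theorem pv_sel_num (L : List (String × Int)) (num : Int) (d : PySem.Dict Int (List String))
    (h : ∀ v : Int, d.contains v = true → v ≤ num) :
    (L.foldl (fun nc vk =>
        if nc.2.contains vk.2 = false then
          ((if vk.2 > nc.1 then vk.2 else nc.1 : Int), nc.2.insert vk.2 [vk.1])
        else (nc.1, nc.2.modify vk.2 [] (fun l => l ++ [vk.1]))) (num, d)).1 =
      (L.map (fun p => p.2)).foldl max num := by
  induction L generalizing num d with
  | nil => rfl
  | cons p L ih =>
    rw [List.foldl_cons, List.map_cons, List.foldl_cons]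
    by_cases hc : d.contains p.2 = false
    · rw [if_pos hc]
      have hnum : (if p.2 > num then p.2 else num) = max num p.2 := by
        by_cases h1 : p.2 > num
        · rw [if_pos h1, max_eq_right (le_of_lt h1)]
        · rw [if_neg h1, max_eq_left (by omega)]
      rw [hnum]
      apply ih
      intro v hv
      rw [PySem.Dict.contains_insert] at hv
      rcases Bool.or_eq_true_iff.mp hv with h1 | h1
      · have : v = p.2 := by simpa using h1
        subst this; exact le_max_right _ _
      · exact le_trans (h v h1) (le_max_left _ _)
    · rw [if_neg hc]
      have hple : p.2 ≤ num := h p.2 (by simpa using hc)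
      have hmx : max num p.2 = num := max_eq_left hple
      rw [ih num _ (fun v hv => by
        rw [PySem.Dict.contains_modify] at hv
        rcases Bool.or_eq_true_iff.mp hv with h1 | h1
        · have : v = p.2 := by simpa using h1
          subst this; exact hple
        · exact h v h1), hmx]

-- head of sorted(xs) = min(xs) for strings
theorem pv_head_sorted_eq_min (xs : List String) (h : xs ≠ []) :
    PySem.List.pyGetD (PySem.List.sorted xs (fun x => x) false) 0 "" =
      (PySem.List.min? xs (fun x => x)).getD "" := by
  rcases hm : PySem.List.min? xs (fun x => x) with _ | m
  · exact absurd ((PySem.List.min?_eq_none_iff _ _).mp hm) h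
  rcases hs : PySem.List.sorted xs (fun x => x) false with _ | ⟨a, t⟩
  · have hlen := PySem.List.length_sorted xs (fun x => x) false
    rw [hs] at hlen
    rcases xs with _ | ⟨y, ys⟩
    · exact absurd rfl h
    · simp at hlen
  rw [PySem.List.pyGetD_zero_cons, Option.getD_some]
  have ha : a ∈ xs := by
    rw [← PySem.List.mem_sorted xs (fun x => x) false, hs]
    exact List.mem_cons_self
  have hm1 : m ∈ xs := PySem.List.min?_mem hm
  have h1 : a ≤ m := PySem.List.key_head_sorted_le xs (fun x => x) hs m hm1
  have h2 : m ≤ a := PySem.List.min?_isMin hm a ha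
  exact le_antisymm h1 h2

theorem pv_best_mem (vals : List Int) (hex : ∃ v ∈ vals, 0 ≤ v) : vals.foldl max 0 ∈ vals := by
  obtain ⟨v, hv, h0⟩ := hex
  rcases PySem.List.foldl_max_mem vals 0 with h1 | h1
  · have h2 := (PySem.List.le_foldl_max vals 0).2 v hv
    rw [h1] at h2 ⊢
    have : v = 0 := le_antisymm h2 h0
    rw [← this]
    exact hv
  · exact h1

theorem pv_num_eq_best (vals : List Int) (hne : vals ≠ []) (hex : ∃ v ∈ vals, 0 ≤ v) :
    vals.foldl max 0 = (PySem.List.max? vals (fun x => x)).getD 0 := by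
  rcases vals with _ | ⟨x, t⟩
  · contradiction
  rw [PySem.List.max?_id_cons, Option.getD_some, List.foldl_cons]
  obtain ⟨v, hv, h0⟩ := hex
  have h1 := PySem.List.le_foldl_max t (max 0 x)
  have h2 := PySem.List.le_foldl_max t x
  have h0M : 0 ≤ t.foldl max x := by
    rcases List.mem_cons.mp hv with hvx | hvt
    · subst hvx; exact le_trans h0 h2.1
    · exact le_trans h0 (h2.2 v hvt)
  apply le_antisymm
  · rcases PySem.List.foldl_max_mem t (max 0 x) with h3 | h3
    · rw [h3]
      exact max_le h0M h2.1
    · exact h2.2 _ h3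
  · rcases PySem.List.foldl_max_mem t x with h4 | h4
    · rw [h4]
      exact le_trans (le_max_right 0 x) h1.1
    · exact h1.2 _ h4

-- characterisation of pvScoreDict lookups: last row with the given head wins
theorem pv_scoredict_getD (table : List String) (languages : List String) (preference : List Int) (c : String) :
    (pvScoreDict table languages preference).getD c 0 =
      (match table.reverse.find? (fun row => PySem.List.pyGetD (PySem.Str.split₀ row) 0 "" == c) with
       | some row => pvRowScore languages preference (PySem.Str.split₀ row)
       | none => 0) := by
  unfold pvScoreDict
  rw [pv_getD_foldl_insert_fn table (fun row => PySem.List.pyGetD (PySem.Str.split₀ row) 0 "")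
    (fun row => pvRowScore languages preference (PySem.Str.split₀ row)) PySem.Dict.empty c 0]
  cases table.reverse.find? (fun row => PySem.List.pyGetD (PySem.Str.split₀ row) 0 "" == c) <;> simp

theorem pv_scoredict_keys (table : List String) (languages : List String) (preference : List Int) :
    (pvScoreDict table languages preference).keys = pvCats table := by
  unfold pvScoreDict pvCats
  rw [PySem.Dict.keys_foldl_insert_key table (fun row => PySem.List.pyGetD (PySem.Str.split₀ row) 0 "")
    (fun _ row => pvRowScore languages preference (PySem.Str.split₀ row)) PySem.Dict.empty]
  rw [PySem.Dict.keys_empty, PySem.Set.update_nil_left]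

-- B's per-row sum equals the spec row score
theorem pv_row_value (languages : List String) (preference : List Int) (ws : List String) :
    ((((PySem.List.enumerate (PySem.List.slice ws (some 1) none) 0).foldl
        (fun r pw => r.insert pw.2 (((PySem.List.slice ws (some 1) none).length : Int) - pw.1))
        PySem.Dict.empty).items).map (fun wr => wr.2 *
          ((languages.zip preference).foldl
            (fun d lp => d.insert lp.1 (d.getD lp.1 0 + lp.2)) PySem.Dict.empty).getD wr.1 0)).sum =
      pvRowScore languages preference ws := by
  have hl : PySem.List.slice ws (some 1) none = ws.drop 1 := by
    rw [PySem.List.slice_from_one, ← List.drop_one]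
  rw [hl]
  have hkeys := pv_rank_keys (ws.drop 1)
  have hnd : ((PySem.List.enumerate (ws.drop 1) 0).foldl
      (fun r pw => r.insert pw.2 (((ws.drop 1).length : Int) - pw.1)) PySem.Dict.empty).keys.Nodup := by
    rw [hkeys]; exact PySem.Set.nodup_ofList _
  rw [PySem.Dict.items_eq_map_keys _ hnd 0, hkeys, List.map_map]
  unfold pvRowScore
  congr 1
  apply List.map_congr_left
  intro w hw
  have hmem : w ∈ ws.drop 1 := (PySem.Set.mem_ofList _ _).mp hw
  simp only [Function.comp]
  rw [pv_rank_getD (ws.drop 1) w hmem, pv_weight_getD (languages.zip preference) PySem.Dict.empty w]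
  rw [PySem.Dict.getD_empty, zero_add]
  rfl

-- B computes pvScoreDict and then selects from it: solution_alt = pvAnswer
theorem pv_alt_eq (table : List String) (languages : List String) (preference : List Int) :
    solution_alt table languages preference = pvAnswer table languages preference := by
  simp only [solution_alt, pvAnswer]
  have hscores : table.foldl (fun sc row =>
      sc.insert (PySem.List.pyGetD (PySem.Str.split₀ row) 0 "")
        ((((PySem.List.enumerate (PySem.List.slice (PySem.Str.split₀ row) (some 1) none) 0).foldl
            (fun r pw => r.insert pw.2 (((PySem.List.slice (PySem.Str.split₀ row) (some 1) none).length : Int) - pw.1))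
            PySem.Dict.empty).items).map (fun wr => wr.2 *
              ((languages.zip preference).foldl
                (fun d lp => d.insert lp.1 (d.getD lp.1 0 + lp.2)) PySem.Dict.empty).getD wr.1 0)).sum)
      PySem.Dict.empty = pvScoreDict table languages preference := by
    unfold pvScoreDict
    apply PySem.List.foldl_congr_mem
    intro acc row _
    rw [pv_row_value languages preference (PySem.Str.split₀ row)]
  rw [hscores]

-- A computes the same dictionary and the same selection: solution = pvAnswer on Pre_
theorem pv_A_eq (table : List String) (languages : List String) (preference : List Int)
    (hne : table ≠ [])
    (hex : ∃ v ∈ (pvScoreDict table languages preference).values, 0 ≤ v) :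
    solution table languages preference = pvAnswer table languages preference := by
  simp only [solution]
  set pt : PySem.Dict String (List String) :=
    (table.map (fun i => PySem.Str.split₀ i)).foldl
      (fun d i => d.insert (PySem.List.pyGetD i 0 "")
        ((PySem.List.slice? i (some (-1)) (some 0) (-1)).getD [])) PySem.Dict.empty with hpt
  set area0 : PySem.Dict String Int :=
    pt.keys.foldl (fun d i => d.insert i 0) PySem.Dict.empty with harea0
  set areaF : PySem.Dict String Int :=
    (languages.zip preference).foldl (fun area ij =>
      pt.keys.foldl (fun area k =>
        if ij.1 ∈ pt.getD k [] then
          area.modify k 0 (fun x => x + (((PySem.List.index? (pt.getD k []) ij.1).getD 0 : Int) + 1) * ij.2)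
        else area) area) area0 with hareaF
  -- keys of pt
  have hptkeys : pt.keys = pvCats table := by
    rw [hpt, PySem.Dict.keys_foldl_insert_key (table.map (fun i => PySem.Str.split₀ i))
      (fun i => PySem.List.pyGetD i 0 "")
      (fun _ i => (PySem.List.slice? i (some (-1)) (some 0) (-1)).getD []) PySem.Dict.empty,
      PySem.Dict.keys_empty, PySem.Set.update_nil_left, List.map_map]
    unfold pvCats
    rfl
  have hcatsnd : (pvCats table).Nodup := PySem.Set.nodup_ofList _
  have hptnd : pt.keys.Nodup := hptkeys ▸ hcatsnd
  have harea0keys : area0.keys = pt.keys := by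
    rw [harea0, PySem.Dict.keys_foldl_insert pt.keys (fun _ _ => (0 : Int)) PySem.Dict.empty,
      PySem.Dict.keys_empty, PySem.Set.update_nil_left, PySem.Set.ofList_eq_self_of_nodup _ hptnd]
  have hareaFkeys : areaF.keys = pt.keys := by
    rw [hareaF]
    exact pv_outer_loop_keys pt (languages.zip preference) area0 harea0keys
  have harea0getD : ∀ c, area0.getD c 0 = 0 := by
    intro c
    rw [harea0, pv_getD_foldl_insert_fn pt.keys (fun i => i) (fun _ => (0 : Int)) PySem.Dict.empty c 0]
    cases pt.keys.reverse.find? (fun x => x == c) with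
    | none => rfl
    | some x => rfl
  -- pt lookups: reversed tail of the last row with the given head
  have hptgetD : ∀ c, pt.getD c [] =
      (match table.reverse.find? (fun row => PySem.List.pyGetD (PySem.Str.split₀ row) 0 "" == c) with
       | some row => ((PySem.Str.split₀ row).drop 1).reverse
       | none => []) := by
    intro c
    rw [hpt, pv_getD_foldl_insert_fn (table.map (fun i => PySem.Str.split₀ i))
      (fun i => PySem.List.pyGetD i 0 "")
      (fun i => (PySem.List.slice? i (some (-1)) (some 0) (-1)).getD []) PySem.Dict.empty c []]
    rw [← List.map_reverse, List.find?_map]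
    simp only [Function.comp_def]
    cases table.reverse.find? (fun row => PySem.List.pyGetD (PySem.Str.split₀ row) 0 "" == c) with
    | none => simp
    | some row => simp [pv_slice_rev_tail]
  -- per-category scores agree with pvScoreDict
  have hscore : ∀ c ∈ pt.keys, areaF.getD c 0 = (pvScoreDict table languages preference).getD c 0 := by
    intro c hc
    rw [hareaF, pv_outer_loop pt (languages.zip preference) area0 hptnd harea0keys c hc,
      harea0getD c, zero_add, pv_scoredict_getD, hptgetD c]
    cases hfind : table.reverse.find? (fun row => PySem.List.pyGetD (PySem.Str.split₀ row) 0 "" == c) with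
    | none => simp
    | some row =>
      simp only []
      have hpoint : ∀ p ∈ languages.zip preference,
          (if p.1 ∈ ((PySem.Str.split₀ row).drop 1).reverse then
            (((PySem.List.index? (((PySem.Str.split₀ row).drop 1).reverse) p.1).getD 0 : Int) + 1) * p.2 else 0) =
          (if p.1 ∈ PySem.Set.ofList ((PySem.Str.split₀ row).drop 1) then
            pvRank ((PySem.Str.split₀ row).drop 1) p.1 * p.2 else 0) := by
        intro p _
        by_cases hm : p.1 ∈ ((PySem.Str.split₀ row).drop 1).reverse
        · rw [if_pos hm, if_pos (by rw [PySem.Set.mem_ofList]; exact List.mem_reverse.mp hm)]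
          rw [pv_index?_getD_of_mem _ _ hm]
          unfold pvRank
          ring
        · rw [if_neg hm, if_neg (by rw [PySem.Set.mem_ofList]; exact fun hh => hm (List.mem_reverse.mpr hh))]
      rw [List.map_congr_left hpoint,
        pv_sum_zip_split (languages.zip preference) (pvRank ((PySem.Str.split₀ row).drop 1))
          (PySem.Set.ofList ((PySem.Str.split₀ row).drop 1)) (PySem.Set.nodup_ofList _)]
      rfl
  -- the two dictionaries have the same items
  have hitems : areaF.items = (pvScoreDict table languages preference).items := by
    rw [PySem.Dict.items_eq_map_keys areaF (by rw [hareaFkeys]; exact hptnd) 0,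
      PySem.Dict.items_eq_map_keys (pvScoreDict table languages preference)
        (by rw [pv_scoredict_keys]; exact hcatsnd) 0,
      hareaFkeys, pv_scoredict_keys, ← hptkeys]
    apply List.map_congr_left
    intro c hc
    rw [hscore c hc]
  rw [hitems]
  rw [pv_sel_snd, pv_sel_num _ _ _ (fun v hv => by simp at hv), pv_close_getD]
  simp only [PySem.Dict.getD_empty, List.nil_append]
  simp only [pvAnswer]
  have hvalsmap : (pvScoreDict table languages preference).values =
      (pvScoreDict table languages preference).items.map (fun p => p.2) := rfl
  have hine : (pvScoreDict table languages preference).items ≠ [] := by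
    intro hnil
    have hk : (pvScoreDict table languages preference).keys = [] := by
      unfold PySem.Dict.keys
      rw [hnil]
      rfl
    rw [pv_scoredict_keys] at hk
    rcases table with _ | ⟨r, t⟩
    · exact hne rfl
    · unfold pvCats at hk
      rw [List.map_cons, PySem.Set.ofList_cons] at hk
      simp at hk
  have hvne : (pvScoreDict table languages preference).items.map (fun p => p.2) ≠ [] := by
    intro hnil
    exact hine (List.map_eq_nil_iff.mp hnil)
  have hexv : ∃ v ∈ (pvScoreDict table languages preference).items.map (fun p => p.2), 0 ≤ v := by
    rw [← hvalsmap]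
    exact hex
  rw [hvalsmap, ← pv_num_eq_best _ hvne hexv]
  apply pv_head_sorted_eq_min
  -- the winning score belongs to some item, so the filtered list is nonempty
  have hbm := pv_best_mem _ hexv
  obtain ⟨q, hq, hq2⟩ := List.mem_map.mp hbm
  intro hnil
  rw [List.map_eq_nil_iff] at hnil
  have : q ∈ (pvScoreDict table languages preference).items.filter
      (fun p => p.2 == (((pvScoreDict table languages preference).items.map (fun p => p.2)).foldl max 0)) := by
    rw [List.mem_filter]
    exact ⟨hq, by simp [hq2]⟩
  rw [hnil] at this
  simp at this

-- ===== VERDICT (by name: the statement is the Claim_ definition above) =====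
theorem solution_spec : Claim_equal_solution := by
  intro table languages preference _ hpre
  unfold Spec_solution
  obtain ⟨hne, _, hex⟩ := hpre
  rw [pv_A_eq table languages preference hne hex, pv_alt_eq table languages preference]
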